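-- pv_equiv track=rewrite | github.com/katherineding/DQMC-Python-Implementation | src/dqmc_util.py | Make_Vec_To_IJ_Dict
-- ===== SOURCE A (Python) =====
-- def ij_pairs_list(Nx: int, Ny: int, dx, dy):
--     """Produce Gblock indices (ilist,jlist) for fixed hopping distance vector (site_j-site_i)
--
--     Args:
--         Nx, Ny: dimension of lattice
--         dx, dy: desired hopping direction vector
--     Out:
--         A tuple of lists (ilist, jlist) representing row and column indices
--         of N*N Gblock matrix we want to extract
--     """
--     ilist, jlist = [], []
--
--     # starting location (x,y)
--     for y in range(Ny):
--         for x in range(Nx):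
--             n_init = x + Nx * y
--             # termination location (x+dx,y+dy) periodic BC
--             pt_end = ((x + dx) % Nx, (y + dy) % Ny)
--             n_end = pt_end[0] + Nx * pt_end[1]
--             ilist.append(n_init)
--             jlist.append(n_end)
--     return ilist, jlist
--
-- def Make_Vec_To_IJ_Dict(Nx, Ny):
--     """Make lookup table/dictionary mapping distance (dx,dy) to lists of
--     total i,j indices in Gblock matrix separated by distance (dx,dy)
--     Args:
--         Nx, Ny: dimension of lattice
--     Out:
--         A nested dictionary, [dx][dy]-th entry is a tuple of lists
--             (ilist, jlist) representing row and column indices of N*N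
--             Gblock matrix that are separated by same distance (dx,dy).
--             Each list is length N"""
--     table = {}
--     for dx in range(Nx):
--         table[dx] = {}
--         for dy in range(Ny):
--             indices = ij_pairs_list(Nx, Ny, dx, dy)
--             table[dx][dy] = indices
--
--     return table
-- ===== SOURCE B (Python) =====
-- def Make_Vec_To_IJ_Dict(Nx, Ny):
--     """Same table as A, but with no per-site modular arithmetic: the flat index
--     grid rows are built by slicing range objects, and each (dx,dy) entry's
--     jlist is obtained by cyclically rotating rows by dx within each row and by
--     dy across rows, then flattening; ilist is range(N) in closed form."""
--     table = {}
--     for dx in range(Nx):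
--         ilist = list(range(Nx * Ny))
--         rows = [list(range(y * Nx, (y + 1) * Nx)) for y in range(Ny)]
--         shifted = [r[dx:] + r[:dx] for r in rows]
--         inner = {}
--         for dy in range(Ny):
--             grid = shifted[dy:] + shifted[:dy]
--             jlist = [v for r in grid for v in r]
--             inner[dy] = (list(ilist), jlist)
--         table[dx] = inner
--     return table
-- ===== Notes on version B (the rewrite author's own statement) =====
-- stated objective: alternative
-- what changed: B builds the flat index grid once and derives each (dx,dy) entry's jlist by cyclic rotation via list slicing (r[dx:]+r[:dx] within rows, shifted[dy:]+shifted[:dy] across rows) and flattening, with ilist = range(N) in closed form, instead of A's per-site modular arithmetic in a nested site loop per entry.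
import Mathlib
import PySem

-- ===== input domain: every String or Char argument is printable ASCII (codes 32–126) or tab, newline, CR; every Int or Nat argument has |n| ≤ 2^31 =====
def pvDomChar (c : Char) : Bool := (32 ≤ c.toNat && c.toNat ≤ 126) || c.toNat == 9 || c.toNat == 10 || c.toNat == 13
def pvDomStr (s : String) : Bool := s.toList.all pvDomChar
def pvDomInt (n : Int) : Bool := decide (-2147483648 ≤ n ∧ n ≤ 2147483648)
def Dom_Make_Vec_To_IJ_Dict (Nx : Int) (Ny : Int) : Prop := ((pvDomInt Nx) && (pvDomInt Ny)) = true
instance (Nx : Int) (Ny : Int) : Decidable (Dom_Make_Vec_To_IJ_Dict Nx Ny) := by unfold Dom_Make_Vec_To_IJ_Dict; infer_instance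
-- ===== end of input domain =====

-- B builds the flat index grid once and derives each (dx,dy) entry by cyclic
-- rotations via list slicing and flattening, with no per-site modular arithmetic.

-- ===== PORT A =====
-- helper ij_pairs_list: nested y/x loops appending to (ilist, jlist)
def pvIjPairsList (Nx Ny dx dy : Int) : List Int × List Int :=
  (PySem.List.pyRange 0 Ny 1).foldl (fun acc y =>
    (PySem.List.pyRange 0 Nx 1).foldl (fun (acc : List Int × List Int) x =>
      let nInit := x + Nx * y
      let ptEnd := (PySem.Int.mod (x + dx) Nx, PySem.Int.mod (y + dy) Ny)
      let nEnd := ptEnd.1 + Nx * ptEnd.2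
      (acc.1 ++ [nInit], acc.2 ++ [nEnd])) acc) ([], [])

-- dict insertions are always at a fresh key, so each 'table[k] = v' is an append
def Make_Vec_To_IJ_Dict (Nx : Int) (Ny : Int) : List (Int × List (Int × List Int × List Int)) :=
  (PySem.List.pyRange 0 Nx 1).foldl (fun table dx =>
    let inner := (PySem.List.pyRange 0 Ny 1).foldl
      (fun (inner : List (Int × List Int × List Int)) dy =>
        let indices := pvIjPairsList Nx Ny dx dy
        inner ++ [(dy, indices)]) []
    table ++ [(dx, inner)]) []

-- ===== PORT B =====
-- l[k:] + l[:k], Python's cyclic left rotation by slicing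
def pvRot {α : Type} (l : List α) (k : Int) : List α :=
  PySem.List.slice l (some k) none ++ PySem.List.slice l none (some k)

def Make_Vec_To_IJ_Dict_alt (Nx : Int) (Ny : Int) : List (Int × List (Int × List Int × List Int)) :=
  (PySem.List.pyRange 0 Nx 1).foldl (fun table dx =>
    let ilist := PySem.List.pyRange 0 (Nx * Ny) 1
    let rows := (PySem.List.pyRange 0 Ny 1).map
      (fun y => PySem.List.pyRange (y * Nx) ((y + 1) * Nx) 1)
    let shifted := rows.map (fun r => pvRot r dx)
    let inner := (PySem.List.pyRange 0 Ny 1).foldl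
      (fun (inner : List (Int × List Int × List Int)) dy =>
        let grid := pvRot shifted dy
        let jlist := grid.flatMap id
        inner ++ [(dy, (ilist, jlist))]) []
    table ++ [(dx, inner)]) []

-- ===== PRECONDITION & SPEC =====
def Spec_Make_Vec_To_IJ_Dict (Nx : Int) (Ny : Int) (out : List (Int × List (Int × List Int × List Int))) : Prop := out = Make_Vec_To_IJ_Dict_alt Nx Ny
instance (Nx : Int) (Ny : Int) (out : List (Int × List (Int × List Int × List Int))) : Decidable (Spec_Make_Vec_To_IJ_Dict Nx Ny out) := by unfold Spec_Make_Vec_To_IJ_Dict; infer_instance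

-- ===== CLAIM (what is proved, stated in full; the proofs are below) =====
def Claim_equal_Make_Vec_To_IJ_Dict : Prop := ∀ (Nx : Int) (Ny : Int), Dom_Make_Vec_To_IJ_Dict Nx Ny → Spec_Make_Vec_To_IJ_Dict Nx Ny (Make_Vec_To_IJ_Dict Nx Ny)

-- ===== LEMMAS AND PROOFS =====

-- a fold that appends to both components of a pair is a pair of flatMaps
theorem pv_foldl_pair_append {α : Type} (F G : α → List Int) :
    ∀ (l : List α) (acc : List Int × List Int),
      l.foldl (fun acc y => (acc.1 ++ F y, acc.2 ++ G y)) acc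
        = (acc.1 ++ l.flatMap F, acc.2 ++ l.flatMap G) := by
  intro l
  induction l with
  | nil => simp
  | cons y t ih => intro acc; simp [List.foldl_cons, ih]

-- shifting a contiguous range
theorem pv_map_add_pyRange (a b c : Int) :
    (PySem.List.pyRange a b 1).map (fun x => x + c) = PySem.List.pyRange (a + c) (b + c) 1 := by
  rw [PySem.List.pyRange_one a b, PySem.List.pyRange_one (a + c) (b + c), List.map_map]
  have : b + c - (a + c) = b - a := by ring
  rw [this]
  exact List.map_congr_left (fun k _ => by simp; ring)

-- row-major enumeration of the Nx×n grid is range(Nx*n)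
theorem pv_ilist_eq (Nx : Int) (hx : 0 ≤ Nx) : ∀ (n : Nat),
    (PySem.List.pyRange 0 (n : Int) 1).flatMap
        (fun y => (PySem.List.pyRange 0 Nx 1).map (fun x => x + Nx * y))
      = PySem.List.pyRange 0 (Nx * n) 1 := by
  intro n
  induction n with
  | zero => simp [PySem.List.pyRange_one_eq_nil]
  | succ m ih =>
    have h1 : ((m + 1 : Nat) : Int) = (m : Int) + 1 := by norm_cast
    rw [h1, PySem.List.pyRange_one_succ_right (by positivity), List.flatMap_append, ih,
       PySem.List.pyRange_one_append 0 (Nx * m) (Nx * ((m : Int) + 1)) (by positivity) (by nlinarith)]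
    congr 1
    simp only [List.flatMap_cons, List.flatMap_nil, List.append_nil]
    rw [pv_map_add_pyRange 0 Nx (Nx * m)]
    congr 1 <;> push_cast <;> ring_nf

-- A's per-entry computation, in canonical flatMap/map-of-mod form
theorem pv_entry_eq (Nx Ny dx dy : Int) (hx : 0 < Nx) (hy : 0 < Ny) :
    pvIjPairsList Nx Ny dx dy
      = (PySem.List.pyRange 0 (Nx * Ny) 1,
         (PySem.List.pyRange 0 Ny 1).flatMap (fun y =>
           (PySem.List.pyRange 0 Nx 1).map
             (fun x => PySem.Int.mod (x + dx) Nx + Nx * PySem.Int.mod (y + dy) Ny))) := by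
  unfold pvIjPairsList
  have inner : ∀ (y : Int) (acc : List Int × List Int),
      (PySem.List.pyRange 0 Nx 1).foldl (fun (acc : List Int × List Int) x =>
          (acc.1 ++ [x + Nx * y],
           acc.2 ++ [PySem.Int.mod (x + dx) Nx + Nx * PySem.Int.mod (y + dy) Ny])) acc
        = (acc.1 ++ (PySem.List.pyRange 0 Nx 1).map (fun x => x + Nx * y),
           acc.2 ++ (PySem.List.pyRange 0 Nx 1).map
             (fun x => PySem.Int.mod (x + dx) Nx + Nx * PySem.Int.mod (y + dy) Ny)) := by
    intro y acc
    rw [pv_foldl_pair_append (fun x => [x + Nx * y])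
      (fun x => [PySem.Int.mod (x + dx) Nx + Nx * PySem.Int.mod (y + dy) Ny])]
    simp [← List.map_eq_flatMap]
  simp only [inner]
  rw [pv_foldl_pair_append
    (fun y => (PySem.List.pyRange 0 Nx 1).map (fun x => x + Nx * y))
    (fun y => (PySem.List.pyRange 0 Nx 1).map
      (fun x => PySem.Int.mod (x + dx) Nx + Nx * PySem.Int.mod (y + dy) Ny))]
  have hNy : ((Ny.toNat : Nat) : Int) = Ny := Int.toNat_of_nonneg hy.le
  simp only [List.nil_append]
  rw [Prod.mk.injEq]
  refine ⟨?_, rfl⟩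
  rw [← hNy]; exact pv_ilist_eq Nx hx.le Ny.toNat

-- rotating a mapped list is mapping the rotated list
theorem pv_rot_map {α β : Type} (f : α → β) (l : List α) (k : Int) (hk : 0 ≤ k) :
    pvRot (l.map f) k = (pvRot l k).map f := by
  unfold pvRot
  rw [PySem.List.slice_from _ hk, PySem.List.slice_to _ hk,
      PySem.List.slice_from _ hk, PySem.List.slice_to _ hk]
  simp

-- rotating range(n) by k is the two ranges swapped
theorem pv_rot_pyRange (n k : Int) (h0 : 0 ≤ k) (hk : k ≤ n) :
    pvRot (PySem.List.pyRange 0 n 1) k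
      = PySem.List.pyRange k n 1 ++ PySem.List.pyRange 0 k 1 := by
  unfold pvRot
  rw [PySem.List.slice_from _ h0, PySem.List.slice_to _ h0,
      PySem.List.pyRange_one_append 0 k n h0 hk]
  have hlen : (PySem.List.pyRange 0 k 1).length = k.toNat := by
    rw [PySem.List.length_pyRange_one]; simp
  rw [← hlen, List.drop_left, List.take_left]

-- the rotation of range(n) equals the pointwise Python-mod shift
theorem pv_rot_eq_mod (n k : Int) (h0 : 0 ≤ k) (hk : k < n) :
    pvRot (PySem.List.pyRange 0 n 1) k
      = (PySem.List.pyRange 0 n 1).map (fun x => PySem.Int.mod (x + k) n) := by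
  rw [pv_rot_pyRange n k h0 hk.le,
      PySem.List.pyRange_one_append 0 (n - k) n (by omega) (by omega), List.map_append]
  congr 1
  · have h := pv_map_add_pyRange 0 (n - k) k
    have h' : PySem.List.pyRange (0 + k) (n - k + k) 1 = PySem.List.pyRange k n 1 := by
      congr 1 <;> ring
    rw [← h', ← h]
    refine (List.map_congr_left (fun x hx => ?_)).symm
    have hb := PySem.List.mem_pyRange_one.mp hx
    rw [PySem.Int.mod_eq_emod_of_pos (by omega), Int.emod_eq_of_lt (by omega) (by omega)]
  · have h := pv_map_add_pyRange (n - k) n (k - n)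
    have h' : PySem.List.pyRange (n - k + (k - n)) (n + (k - n)) 1
        = PySem.List.pyRange 0 k 1 := by congr 1 <;> ring
    rw [← h', ← h]
    refine (List.map_congr_left (fun x hx => ?_)).symm
    have hb := PySem.List.mem_pyRange_one.mp hx
    rw [PySem.Int.mod_eq_emod_of_pos (by omega), ← Int.sub_emod_right (x + k) n,
        Int.emod_eq_of_lt (by omega) (by omega)]
    ring

-- ===== VERDICT (by name: the statement is the Claim_ definition above) =====
theorem Make_Vec_To_IJ_Dict_spec : Claim_equal_Make_Vec_To_IJ_Dict := by
  intro Nx Ny _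
  unfold Spec_Make_Vec_To_IJ_Dict Make_Vec_To_IJ_Dict Make_Vec_To_IJ_Dict_alt
  simp only [PySem.List.foldl_append_singleton_eq_map, List.nil_append]
  refine List.map_congr_left (fun dx hdx => ?_)
  obtain ⟨hdx0, hdxn⟩ := PySem.List.mem_pyRange_one.mp hdx
  have hx : 0 < Nx := lt_of_le_of_lt hdx0 hdxn
  refine congrArg (fun l => (dx, l)) ?_
  refine List.map_congr_left (fun dy hdy => ?_)
  obtain ⟨hdy0, hdyn⟩ := PySem.List.mem_pyRange_one.mp hdy
  have hy : 0 < Ny := lt_of_le_of_lt hdy0 hdyn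
  refine congrArg (fun p => (dy, p)) ?_
  rw [pv_entry_eq Nx Ny dx dy hx hy]
  refine congrArg (fun j => (PySem.List.pyRange 0 (Nx * Ny) 1, j)) ?_
  -- B's grid: rotate the row list by dy, rows already rotated by dx
  have rows_eq : (PySem.List.pyRange 0 Ny 1).map
        (fun y => pvRot (PySem.List.pyRange (y * Nx) ((y + 1) * Nx) 1) dx)
      = (PySem.List.pyRange 0 Ny 1).map (fun y =>
          (PySem.List.pyRange 0 Nx 1).map
            (fun x => PySem.Int.mod (x + dx) Nx + Nx * y)) := by
    refine List.map_congr_left (fun y _ => ?_)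
    have hr : PySem.List.pyRange (y * Nx) ((y + 1) * Nx) 1
        = (PySem.List.pyRange 0 Nx 1).map (fun x => x + Nx * y) := by
      rw [pv_map_add_pyRange 0 Nx (Nx * y)]
      congr 1 <;> ring
    rw [hr, pv_rot_map _ _ _ hdx0, pv_rot_eq_mod Nx dx hdx0 hdxn, List.map_map]
    simp [Function.comp]
  simp only [List.map_map, Function.comp_def]
  rw [rows_eq, pv_rot_map _ _ _ hdy0, pv_rot_eq_mod Ny dy hdy0 hdyn, List.map_map,
      List.flatMap_map]
  simp [Function.comp, List.map_eq_flatMap]
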